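-- pv_equiv track=rewrite | github.com/ARYANK-08/codeai | codereader/views.py | parse_directory_summary
-- ===== SOURCE A (Python) =====
-- def parse_directory_summary(directory_summary):
--     items = directory_summary.split(" | ")
--     html_content = '<ul>'
--     inside_folder = False
--
--     for item in items:
--         if item.startswith("Folder:"):
--             if inside_folder:
--                 html_content += '</ul></details></li>'
--             folder_name = item.replace("Folder:", "").strip()
--             html_content += f'<li><details><summary><i class="fa fa-folder"></i> {folder_name}</summary><ul>'
--             inside_folder = True
--         elif item.startswith("File:"):
--             file_name = item.replace("File:", "").strip()
--             icon = "fa-file-code" if any(file_name.endswith(ext) for ext in ['.html', '.py', '.js', '.css']) else "fa-file-alt"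
--             html_content += f'<li><i class="fa {icon}"></i> {file_name}</li>'
--
--     if inside_folder:
--         html_content += '</ul></details></li>'
--
--     html_content += '</ul>'
--     return html_content
-- ===== SOURCE B (Python) =====
-- def parse_directory_summary(directory_summary):
--     # Pass 1: build a model — top-level file <li> snippets, plus folders in order,
--     # each folder a (name, [file <li> snippets]) pair; 'current' is the open folder.
--     top_files = []
--     closed_folders = []
--     current = None
--     for item in directory_summary.split(" | "):
--         if item.startswith("Folder:"):
--             if current is not None:
--                 closed_folders.append(current)
--             current = (item.replace("Folder:", "").strip(), [])
--         elif item.startswith("File:"):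
--             file_name = item.replace("File:", "").strip()
--             icon = "fa-file-code" if any(file_name.endswith(ext) for ext in ['.html', '.py', '.js', '.css']) else "fa-file-alt"
--             li = f'<li><i class="fa {icon}"></i> {file_name}</li>'
--             if current is not None:
--                 current[1].append(li)
--             else:
--                 top_files.append(li)
--     if current is not None:
--         closed_folders.append(current)
--     # Pass 2: render the model.
--     html = '<ul>' + ''.join(top_files)
--     for folder_name, files in closed_folders:
--         html += (f'<li><details><summary><i class="fa fa-folder"></i> {folder_name}</summary><ul>'
--                  + ''.join(files) + '</ul></details></li>')
--     return html + '</ul>'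
-- ===== Notes on version B (the rewrite author's own statement) =====
-- stated objective: alternative
-- what changed: A grows one HTML string in a single pass using an inside_folder flag; B first parses the tokens into a model (top-level file snippets plus an ordered list of folders each holding its file snippets) and then renders that model in a second pass.
import Mathlib
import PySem

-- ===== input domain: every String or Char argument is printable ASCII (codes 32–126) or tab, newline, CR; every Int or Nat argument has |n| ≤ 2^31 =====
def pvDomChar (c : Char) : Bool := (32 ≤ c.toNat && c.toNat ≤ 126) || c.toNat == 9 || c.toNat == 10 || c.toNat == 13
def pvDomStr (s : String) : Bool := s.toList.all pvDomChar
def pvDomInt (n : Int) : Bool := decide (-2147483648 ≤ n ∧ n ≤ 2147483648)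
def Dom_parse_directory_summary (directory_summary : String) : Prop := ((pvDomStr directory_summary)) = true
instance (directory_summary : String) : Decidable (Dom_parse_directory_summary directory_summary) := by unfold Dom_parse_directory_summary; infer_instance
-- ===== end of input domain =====

-- B replaces A's single pass that grows one HTML string with a flag by a two-pass
-- decomposition: first build a model (top-level files, folders each with their files),
-- then render it (objective: alternative decomposition, same cost).

-- shared per-item snippets: both Pythons contain these identical expressions
def pvFolderName (item : String) : String :=
  PySem.Str.strip (PySem.Str.replace item "Folder:" "")

def pvFolderOpen (name : String) : String :=
  "<li><details><summary><i class=\"fa fa-folder\"></i> " ++ name ++ "</summary><ul>"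

def pvFileLi (item : String) : String :=
  let file_name := PySem.Str.strip (PySem.Str.replace item "File:" "")
  let icon := if [".html", ".py", ".js", ".css"].any (fun ext => PySem.Str.endswith file_name ext)
              then "fa-file-code" else "fa-file-alt"
  "<li><i class=\"fa " ++ icon ++ "\"></i> " ++ file_name ++ "</li>"

-- ===== PORT A =====
-- loop body of A: state is (html_content, inside_folder)
def pvStepA (st : String × Bool) (item : String) : String × Bool :=
  if PySem.Str.startswith item "Folder:" then
    let html := if st.2 then st.1 ++ "</ul></details></li>" else st.1
    (html ++ pvFolderOpen (pvFolderName item), true)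
  else if PySem.Str.startswith item "File:" then
    (st.1 ++ pvFileLi item, st.2)
  else st

def parse_directory_summary (directory_summary : String) : String :=
  -- split? is `some` here since the separator " | " is a non-empty literal
  let items := (PySem.Str.split? directory_summary " | ").getD []
  let st := items.foldl pvStepA ("<ul>", false)
  (if st.2 then st.1 ++ "</ul></details></li>" else st.1) ++ "</ul>"

-- ===== PORT B =====
-- loop body of B's first pass: state is (top_files, closed_folders, current)
def pvStepB (st : List String × List (String × List String) × Option (String × List String))
    (item : String) : List String × List (String × List String) × Option (String × List String) :=
  if PySem.Str.startswith item "Folder:" then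
    let closed := match st.2.2 with | some f => st.2.1 ++ [f] | none => st.2.1
    (st.1, closed, some (pvFolderName item, []))
  else if PySem.Str.startswith item "File:" then
    let li := pvFileLi item
    match st.2.2 with
    | some f => (st.1, st.2.1, some (f.1, f.2 ++ [li]))
    | none => (st.1 ++ [li], st.2.1, st.2.2)
  else st

-- rendering of one closed folder (B's second pass adds this per folder)
def pvRenderFolder (f : String × List String) : String :=
  pvFolderOpen f.1 ++ PySem.Str.join "" f.2 ++ "</ul></details></li>"

def parse_directory_summary_alt (directory_summary : String) : String :=
  let items := (PySem.Str.split? directory_summary " | ").getD []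
  let st := items.foldl pvStepB ([], [], none)
  let closed := match st.2.2 with | some f => st.2.1 ++ [f] | none => st.2.1
  let html := closed.foldl (fun h f => h ++ pvRenderFolder f) ("<ul>" ++ PySem.Str.join "" st.1)
  html ++ "</ul>"

-- ===== PRECONDITION & SPEC =====
def Spec_parse_directory_summary (directory_summary : String) (out : String) : Prop := out = parse_directory_summary_alt directory_summary
instance (directory_summary : String) (out : String) : Decidable (Spec_parse_directory_summary directory_summary out) := by unfold Spec_parse_directory_summary; infer_instance

-- ===== CLAIM (what is proved, stated in full; the proofs are below) =====
def Claim_equal_parse_directory_summary : Prop := ∀ (directory_summary : String), Dom_parse_directory_summary directory_summary → Spec_parse_directory_summary directory_summary (parse_directory_summary directory_summary)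

-- ===== LEMMAS AND PROOFS =====

theorem pv_join_nil : PySem.Str.join "" [] = "" := by decide

theorem pv_join_snoc (xs : List String) (x : String) :
    PySem.Str.join "" (xs ++ [x]) = PySem.Str.join "" xs ++ x := by
  rw [← String.toList_inj]
  simp only [PySem.Str.toList_join, String.toList_append, List.map_append, List.map_cons,
    List.map_nil]
  induction xs with
  | nil => simp [PySem.Chars.join_nil, PySem.Chars.join_singleton]
  | cons h t ih =>
    cases t <;> simp_all [PySem.Chars.join_cons_cons, PySem.Chars.join_singleton]

-- what A's accumulated string is, in terms of B's model state
def pvRender (top : List String) (closed : List (String × List String))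
    (current : Option (String × List String)) : String :=
  (closed.foldl (fun h f => h ++ pvRenderFolder f) ("<ul>" ++ PySem.Str.join "" top)) ++
  (match current with | some f => pvFolderOpen f.1 ++ PySem.Str.join "" f.2 | none => "")

-- the loop invariant: from related states, A's finished string equals B's rendering
theorem pv_loop (items : List String) (html : String) (top : List String)
    (closed : List (String × List String)) (current : Option (String × List String))
    (hh : html = pvRender top closed current) (hc : current = none → closed = []) :
    ((if (items.foldl pvStepA (html, current.isSome)).2 then
        (items.foldl pvStepA (html, current.isSome)).1 ++ "</ul></details></li>"
      else (items.foldl pvStepA (html, current.isSome)).1) ++ "</ul>")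
    = ((match (items.foldl pvStepB (top, closed, current)).2.2 with
        | some f => (items.foldl pvStepB (top, closed, current)).2.1 ++ [f]
        | none => (items.foldl pvStepB (top, closed, current)).2.1).foldl
          (fun h f => h ++ pvRenderFolder f)
          ("<ul>" ++ PySem.Str.join "" (items.foldl pvStepB (top, closed, current)).1)) ++ "</ul>" := by
  induction items generalizing html top closed current with
  | nil =>
    cases current with
    | none =>
      have : closed = [] := hc rfl
      subst this
      simp [pvRender] at hh
      simp [hh]
    | some f =>
      simp only [List.foldl_nil, Option.isSome_some, if_pos]
      subst hh
      simp [pvRender, pvRenderFolder, List.foldl_append, String.append_assoc]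
  | cons item rest ih =>
    by_cases h1 : PySem.Str.startswith item "Folder:" = true
    · cases current with
      | none =>
        have hcl : closed = [] := hc rfl
        subst hcl
        simp only [List.foldl_cons, pvStepA, pvStepB, h1, if_pos, Option.isSome_none,
          Bool.false_eq_true, if_false]
        refine ih (html ++ pvFolderOpen (pvFolderName item)) top []
          (some (pvFolderName item, [])) ?_ ?_
        · subst hh
          simp [pvRender, pv_join_nil, String.append_assoc]
        · intro h; simp at h
      | some f =>
        simp only [List.foldl_cons, pvStepA, pvStepB, h1, if_pos, Option.isSome_some]
        refine ih (html ++ "</ul></details></li>" ++ pvFolderOpen (pvFolderName item)) top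
          (closed ++ [f]) (some (pvFolderName item, [])) ?_ ?_
        · subst hh
          simp [pvRender, pvRenderFolder, pv_join_nil, List.foldl_append, String.append_assoc]
        · intro h; simp at h
    · by_cases h2 : PySem.Str.startswith item "File:" = true
      · cases current with
        | none =>
          have hcl : closed = [] := hc rfl
          subst hcl
          simp only [List.foldl_cons, pvStepA, pvStepB, h1, h2, Bool.false_eq_true, if_false,
            if_pos, Option.isSome_none]
          refine ih (html ++ pvFileLi item) (top ++ [pvFileLi item]) [] none ?_ (fun _ => rfl)
          subst hh
          simp [pvRender, pv_join_snoc, String.append_assoc]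
        | some f =>
          simp only [List.foldl_cons, pvStepA, pvStepB, h1, h2, Bool.false_eq_true, if_false,
            if_pos, Option.isSome_some]
          refine ih (html ++ pvFileLi item) top closed (some (f.1, f.2 ++ [pvFileLi item])) ?_ ?_
          · subst hh
            simp [pvRender, pvRenderFolder, pv_join_snoc, String.append_assoc]
          · intro h; simp at h
      · simp only [List.foldl_cons, pvStepA, pvStepB, h1, h2, Bool.false_eq_true, if_false]
        exact ih _ _ _ _ hh hc

-- ===== VERDICT (by name: the statement is the Claim_ definition above) =====
theorem parse_directory_summary_spec : Claim_equal_parse_directory_summary := by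
  intro s _
  show parse_directory_summary s = parse_directory_summary_alt s
  simp only [parse_directory_summary, parse_directory_summary_alt]
  exact pv_loop ((PySem.Str.split? s " | ").getD []) "<ul>" [] [] none
    (by simp [pvRender, pv_join_nil]) (fun _ => rfl)
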